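-- pv_equiv track=rewrite | github.com/FIAP-grupo-challenge/aula_python | matriz_colunas_pares_igual_1.py | criar_matiz
-- ===== SOURCE A (Python) =====
-- def criar_matiz(linhas, colunas):
--     matriz = []
--     for i in range(linhas):
--         matriz.append([])
--         for j in range(colunas):
--             if j % 2 == 0:
--                 matriz[i].append(1)
--             else:
--                 matriz[i].append(0)
--     return matriz
-- ===== SOURCE B (Python) =====
-- def criar_matiz(linhas, colunas):
--     if linhas <= 0:
--         return []
--     linha = ([1, 0] * ((colunas + 1) // 2))[:colunas]
--     return [linha[:] for _ in range(linhas)]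
-- ===== Notes on version B (the rewrite author's own statement) =====
-- stated objective: alternative
-- what changed: B never tests a column's parity: it tiles the two-element period [1, 0] by list repetition ((colunas+1)//2 copies), truncates to colunas with a slice, and replicates copies of that row, instead of A's nested loops deciding each cell with j % 2.
import Mathlib
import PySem

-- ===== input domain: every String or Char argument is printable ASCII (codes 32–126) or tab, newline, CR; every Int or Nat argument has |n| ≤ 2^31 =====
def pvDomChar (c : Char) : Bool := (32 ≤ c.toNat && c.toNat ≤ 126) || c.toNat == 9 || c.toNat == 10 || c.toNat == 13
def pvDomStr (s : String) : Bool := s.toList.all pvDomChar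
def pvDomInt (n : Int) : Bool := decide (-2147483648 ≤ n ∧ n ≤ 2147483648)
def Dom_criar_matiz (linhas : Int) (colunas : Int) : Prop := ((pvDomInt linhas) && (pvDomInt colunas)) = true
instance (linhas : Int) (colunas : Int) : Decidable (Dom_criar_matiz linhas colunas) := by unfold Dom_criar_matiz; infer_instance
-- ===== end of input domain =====

-- B builds the row by tiling the period [1, 0] with list repetition and a truncating
-- slice — no parity test anywhere — then replicates copies of it (objective: alternative).

-- ===== PORT A =====
-- matriz[i].append(x) is ported by hand as List.modify at index i.toNat with (· ++ [x]);
-- exact here because i comes from range(linhas), so 0 ≤ i < matriz.length at each use.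
def criar_matiz (linhas : Int) (colunas : Int) : List (List Int) :=
  (PySem.List.pyRange 0 linhas 1).foldl
    (fun matriz i =>
      let matriz := matriz ++ [([] : List Int)]
      (PySem.List.pyRange 0 colunas 1).foldl
        (fun m j =>
          if j % 2 == 0 then m.modify i.toNat (fun r => r ++ [(1 : Int)])
          else m.modify i.toNat (fun r => r ++ [(0 : Int)]))
        matriz)
    []

-- ===== PORT B =====
-- Python list repetition [1, 0] * k is ported by hand as flatten (replicate k.toNat [1, 0]);
-- exact: Python returns the empty list for k ≤ 0, matched by Int.toNat.
def criar_matiz_alt (linhas : Int) (colunas : Int) : List (List Int) :=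
  if linhas ≤ 0 then [] else
  let linha := PySem.List.slice
    (List.flatten (List.replicate (PySem.Int.floordiv (colunas + 1) 2).toNat [(1 : Int), 0]))
    none (some colunas)
  (PySem.List.pyRange 0 linhas 1).map (fun _ => linha)

-- ===== PRECONDITION & SPEC =====
def Spec_criar_matiz (linhas : Int) (colunas : Int) (out : List (List Int)) : Prop := out = criar_matiz_alt linhas colunas
instance (linhas : Int) (colunas : Int) (out : List (List Int)) : Decidable (Spec_criar_matiz linhas colunas out) := by unfold Spec_criar_matiz; infer_instance

-- ===== CLAIM (what is proved, stated in full; the proofs are below) =====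
def Claim_equal_criar_matiz : Prop := ∀ (linhas : Int) (colunas : Int), Dom_criar_matiz linhas colunas → Spec_criar_matiz linhas colunas (criar_matiz linhas colunas)

-- ===== LEMMAS AND PROOFS =====

theorem pv_modify_last {α : Type} (m : List α) (a : α) (f : α → α) :
    (m ++ [a]).modify m.length f = m ++ [f a] := by
  induction m with
  | nil => simp
  | cons x xs ih => simp [ih]

-- the inner loop of A appends one cell per j to the last row
theorem pv_inner (js : List Int) (m : List (List Int)) (acc : List Int) :
    js.foldl
      (fun mm j =>
        if j % 2 == 0 then mm.modify m.length (fun r => r ++ [(1 : Int)])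
        else mm.modify m.length (fun r => r ++ [(0 : Int)]))
      (m ++ [acc])
    = m ++ [acc ++ js.map (fun j => if j % 2 == 0 then (1 : Int) else 0)] := by
  induction js generalizing acc with
  | nil => simp
  | cons j rest ih =>
    have hstep : (if j % 2 == 0 then (m ++ [acc]).modify m.length (fun r => r ++ [(1 : Int)])
        else (m ++ [acc]).modify m.length (fun r => r ++ [(0 : Int)]))
        = m ++ [acc ++ [if j % 2 == 0 then (1 : Int) else 0]] := by
      by_cases hj : j % 2 == 0 <;> simp [hj, pv_modify_last]
    rw [List.foldl_cons, hstep, ih]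
    simp

-- the outer loop of A builds n copies of the parity row
theorem pv_outer (colunas : Int) (n : Nat) :
    (List.range n).foldl
      (fun matriz k =>
        (PySem.List.pyRange 0 colunas 1).foldl
          (fun m j =>
            if j % 2 == 0 then m.modify ((0 + (k : Int))).toNat (fun r => r ++ [(1 : Int)])
            else m.modify ((0 + (k : Int))).toNat (fun r => r ++ [(0 : Int)]))
          (matriz ++ [([] : List Int)]))
      []
    = List.replicate n ((PySem.List.pyRange 0 colunas 1).map
        (fun j => if j % 2 == 0 then (1 : Int) else 0)) := by
  induction n with
  | zero => simp
  | succ n ih =>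
    rw [List.range_succ, List.foldl_append, List.foldl_cons, List.foldl_nil, ih]
    have hlen : ((0 + (n : Int))).toNat = (List.replicate n
        ((PySem.List.pyRange 0 colunas 1).map
          (fun j => if j % 2 == 0 then (1 : Int) else 0))).length := by simp
    rw [hlen, pv_inner]
    rw [List.replicate_succ']
    simp

-- the [1,0] tiling equals the parity map over an even range
theorem pv_tile (k : Nat) :
    List.flatten (List.replicate k [(1 : Int), 0])
    = (List.range (2 * k)).map (fun j : Nat => if (j : Int) % 2 == 0 then (1 : Int) else 0) := by
  induction k with
  | zero => simp
  | succ k ih =>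
    have h2 : 2 * (k + 1) = (2 * k) + 1 + 1 := by omega
    rw [List.replicate_succ', List.flatten_append, ih, h2,
        List.range_succ, List.range_succ]
    simp

-- B's truncated tiling equals A's parity row, for every integer colunas
theorem pv_row (colunas : Int) :
    PySem.List.slice
      (List.flatten (List.replicate (PySem.Int.floordiv (colunas + 1) 2).toNat [(1 : Int), 0]))
      none (some colunas)
    = (PySem.List.pyRange 0 colunas 1).map (fun j => if j % 2 == 0 then (1 : Int) else 0) := by
  rcases (by omega : colunas ≤ 0 ∨ 0 < colunas) with h | h
  · have hk : (PySem.Int.floordiv (colunas + 1) 2).toNat = 0 := by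
      rw [PySem.Int.floordiv_eq_ediv_of_pos (by norm_num)]; omega
    have hr : (colunas - 0).toNat = 0 := by omega
    rw [hk, PySem.List.pyRange_one, hr]
    simp [PySem.List.slice]
  · obtain ⟨m, rfl⟩ : ∃ m : Nat, colunas = (m : Int) :=
      ⟨colunas.toNat, (Int.toNat_of_nonneg (le_of_lt h)).symm⟩
    have hk : (PySem.Int.floordiv ((m : Int) + 1) 2).toNat = (m + 1) / 2 := by
      rw [PySem.Int.floordiv_eq_ediv_of_pos (by norm_num)]; omega
    rw [hk, pv_tile, PySem.List.slice_to_natCast, ← List.map_take, List.take_range]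
    have hmin : min m (2 * ((m + 1) / 2)) = m := by omega
    rw [hmin, PySem.List.pyRange_one]
    simp

-- ===== VERDICT (by name: the statement is the Claim_ definition above) =====
theorem criar_matiz_spec : Claim_equal_criar_matiz := by
  intro linhas colunas _
  unfold Spec_criar_matiz criar_matiz criar_matiz_alt
  rw [PySem.List.pyRange_one 0 linhas, List.foldl_map, List.map_map, pv_outer]
  by_cases h : linhas ≤ 0
  · have h0 : (linhas - 0).toNat = 0 := by omega
    simp [h, h0]
  · rw [pv_row]
    simp [h, Function.comp_def, List.map_const']
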